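-- pv_equiv track=rewrite | github.com/zk467701860/SKnowledgeGraph | skgraph/util/data_clean_util.py | rename_property
-- ===== SOURCE A (Python) =====
-- def rename_property(node_list):
--     property_set = construct_property_set(node_list)
--     i = 0
--     for node in node_list:
--         node_properties = dict(node).keys()
--         for each in node_properties:
--             if each in property_set and each != "name":
--                 new_property = each + "#" + str(i)
--                 node[new_property] = node.pop(each)
--         i += 1
--     return node_list
--
-- def construct_property_set(node_list):
--     result_set = set()
--     property_list = []
--     for node in node_list:
--         node_properties = set(dict(node).keys())
--         property_list.append(node_properties)
--
--     for i in range(0, len(property_list) - 1):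
--         for j in range(i + 1, len(property_list)):
--             result_set = result_set | (property_list[i] & property_list[j])
--     return result_set
-- ===== SOURCE B (Python) =====
-- def rename_property(node_list):
--     # Count, in one pass, how many nodes carry each property.
--     counts = {}
--     for node in node_list:
--         for prop in node:
--             counts[prop] = counts.get(prop, 0) + 1
--     # Rename every property carried by at least two nodes (except "name").
--     for i, node in enumerate(node_list):
--         shared = [p for p in node if counts[p] >= 2 and p != "name"]
--         for p in shared:
--             node[p + "#" + str(i)] = node.pop(p)
--     return node_list
-- ===== Notes on version B (the rewrite author's own statement) =====
-- stated objective: faster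
-- what changed: A's O(n^2) pairwise intersection of the nodes' key sets (construct_property_set) is replaced by a single counting pass over all keys (a property is shared iff its node count is >= 2), followed by one enumerate-driven rename pass.
import Mathlib
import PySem

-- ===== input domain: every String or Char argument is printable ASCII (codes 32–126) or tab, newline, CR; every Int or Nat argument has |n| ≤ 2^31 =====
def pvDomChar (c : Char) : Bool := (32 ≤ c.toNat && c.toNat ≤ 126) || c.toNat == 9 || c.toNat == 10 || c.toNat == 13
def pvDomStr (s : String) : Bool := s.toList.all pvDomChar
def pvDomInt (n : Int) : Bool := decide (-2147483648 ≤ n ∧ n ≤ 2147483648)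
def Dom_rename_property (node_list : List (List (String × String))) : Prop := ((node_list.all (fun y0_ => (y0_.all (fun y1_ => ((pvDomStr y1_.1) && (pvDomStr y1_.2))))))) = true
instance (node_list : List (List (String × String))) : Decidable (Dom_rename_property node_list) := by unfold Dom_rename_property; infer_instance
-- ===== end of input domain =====

-- B replaces A's O(n^2) pairwise key-set-intersection helper by a single counting pass
-- (a property is shared iff it occurs in >= 2 nodes); A mutates the node dicts in place,
-- the equivalence proved here is about the returned value.

-- ===== PORT A =====
-- construct_property_set, first loop: the list of the nodes' key sets
def rp_propertyList (node_list : List (List (String × String))) : List (PySem.Set String) :=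
  node_list.foldl (fun acc node => acc ++ [PySem.Set.ofList (PySem.Dict.ofList node).keys]) []

-- construct_property_set, second loop: union of the pairwise intersections
def rp_propertySet (node_list : List (List (String × String))) : PySem.Set String :=
  (PySem.List.pyRange 0 (((rp_propertyList node_list).length : Int) - 1) 1).foldl
    (fun rs i =>
      (PySem.List.pyRange (i + 1) ((rp_propertyList node_list).length : Int) 1).foldl
        (fun rs j =>
          PySem.Set.union rs (PySem.Set.inter
            (PySem.List.pyGetD (rp_propertyList node_list) i [])
            (PySem.List.pyGetD (rp_propertyList node_list) j []))) rs)
    PySem.Set.empty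

-- the body of A's per-node loop (keys snapshot; pop + append-rename)
def rp_renameNode (pset : PySem.Set String) (i : Int) (node : List (String × String)) :
    List (String × String) :=
  ((PySem.Dict.ofList node).keys.foldl (fun d k =>
      if pset.contains k && k != "name" then
        match d.pop? k with
        | some (v, d') => d'.insert (k ++ "#" ++ PySem.Int.toStr i) v
        | none => d
      else d) (PySem.Dict.ofList node)).items

def rename_property (node_list : List (List (String × String))) : List (List (String × String)) :=
  (node_list.foldl
    (fun (acc : List (List (String × String)) × Int) node =>
      (acc.1 ++ [rp_renameNode (rp_propertySet node_list) acc.2 node], acc.2 + 1)) ([], 0)).1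

-- ===== PORT B =====
-- one counting pass: how many nodes carry each property
def rpAlt_counts (node_list : List (List (String × String))) : PySem.Dict String Int :=
  node_list.foldl (fun c node =>
      (PySem.Dict.ofList node).keys.foldl (fun c p => c.insert p (c.getD p 0 + 1)) c)
    PySem.Dict.empty

-- rename the shared (count >= 2, not "name") properties of one node
def rpAlt_renameNode (counts : PySem.Dict String Int) (i : Int) (node : List (String × String)) :
    List (String × String) :=
  (((PySem.Dict.ofList node).keys.filter
        (fun p => decide (2 ≤ counts.getD p 0) && p != "name")).foldl
      (fun d p =>
        match d.pop? p with
        | some (v, d') => d'.insert (p ++ "#" ++ PySem.Int.toStr i) v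
        | none => d) (PySem.Dict.ofList node)).items

def rename_property_alt (node_list : List (List (String × String))) :
    List (List (String × String)) :=
  (PySem.List.enumerate node_list 0).map
    (fun p => rpAlt_renameNode (rpAlt_counts node_list) p.1 p.2)

-- ===== PRECONDITION & SPEC =====
def Spec_rename_property (node_list : List (List (String × String))) (out : List (List (String × String))) : Prop := out = rename_property_alt node_list
instance (node_list : List (List (String × String))) (out : List (List (String × String))) : Decidable (Spec_rename_property node_list out) := by unfold Spec_rename_property; infer_instance

-- ===== CLAIM (what is proved, stated in full; the proofs are below) =====
def Claim_equal_rename_property : Prop := ∀ (node_list : List (List (String × String))), Dom_rename_property node_list → Spec_rename_property node_list (rename_property node_list)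

-- ===== LEMMAS AND PROOFS =====

-- A's counter loop is a map over enumerate
lemma rp_foldl_counter_eq_map {α β : Type} (f : Int → α → β) (l : List α) :
    ∀ (acc : List β) (i : Int),
      (l.foldl (fun a node => (a.1 ++ [f a.2 node], a.2 + 1)) (acc, i)).1
        = acc ++ (PySem.List.enumerate l i).map (fun p => f p.1 p.2) := by
  induction l with
  | nil => intro acc i; simp [PySem.List.enumerate_nil]
  | cons x l ih =>
      intro acc i
      simp [PySem.List.enumerate_cons, ih, List.append_assoc]

-- membership in a fold whose step adds elements monotonically
lemma rp_mem_foldl_iff {α : Type} (Q : α → Prop) (h : PySem.Set String → α → PySem.Set String)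
    (k : String) (H : ∀ s x, (k ∈ h s x ↔ k ∈ s ∨ Q x)) :
    ∀ (l : List α) (s0 : PySem.Set String),
      (k ∈ l.foldl h s0 ↔ k ∈ s0 ∨ ∃ x ∈ l, Q x) := by
  intro l
  induction l with
  | nil => intro s0; simp
  | cons x l ih =>
      intro s0
      rw [List.foldl_cons, ih, H]
      constructor
      · rintro ((hs | hq) | ⟨y, hy, hqy⟩)
        · exact Or.inl hs
        · exact Or.inr ⟨x, by simp, hq⟩
        · exact Or.inr ⟨y, by simp [hy], hqy⟩
      · rintro (hs | ⟨y, hy, hqy⟩)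
        · exact Or.inl (Or.inl hs)
        · rcases List.mem_cons.mp hy with rfl | hy
          · exact Or.inl (Or.inr hqy)
          · exact Or.inr ⟨y, hy, hqy⟩

-- count of k over concatenated nodup key lists = number of lists containing k
lemma rp_count_flatMap (k : String) :
    ∀ (P : List (List String)), (∀ p ∈ P, p.Nodup) →
      (P.flatMap id).count k = P.countP (fun p => decide (k ∈ p)) := by
  intro P
  induction P with
  | nil => intro _; simp
  | cons p P ih =>
      intro h
      have hp : p.Nodup := h p (by simp)
      have hP : ∀ q ∈ P, q.Nodup := fun q hq => h q (by simp [hq])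
      have hcount : p.count k = if k ∈ p then 1 else 0 := by
        by_cases hk : k ∈ p
        · simp [hk, List.count_eq_one_of_mem hp hk]
        · simp [hk, List.count_eq_zero_of_not_mem hk]
      simp only [List.flatMap_cons, id, List.count_append, List.countP_cons]
      rw [ih hP, hcount]
      by_cases hk : k ∈ p <;> simp [hk] <;> try omega

-- at least two of the lists contain k iff countP ≥ 2
lemma rp_two_le_countP (k : String) :
    ∀ (P : List (List String)),
      ((∃ a b : Nat, a < b ∧ b < P.length ∧ k ∈ P.getD a [] ∧ k ∈ P.getD b []) ↔
        2 ≤ P.countP (fun p => decide (k ∈ p))) := by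
  intro P
  induction P with
  | nil => simp
  | cons p P ih =>
      have hmem : (∃ q ∈ P, k ∈ q) ↔ ∃ b : Nat, b < P.length ∧ k ∈ P.getD b [] := by
        constructor
        · rintro ⟨q, hq, hkq⟩
          rcases List.getElem_of_mem hq with ⟨b, hb, rfl⟩
          refine ⟨b, hb, ?_⟩
          rw [List.getD_eq_getElem?_getD, List.getElem?_eq_getElem hb]
          exact hkq
        · rintro ⟨b, hb, hkb⟩
          refine ⟨P.getD b [], ?_, hkb⟩
          rw [List.getD_eq_getElem?_getD, List.getElem?_eq_getElem hb]
          exact List.getElem_mem hb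
      rw [List.countP_cons]
      constructor
      · rintro ⟨a, b, hab, hb, hka, hkb⟩
        rcases b with _ | b
        · omega
        rcases a with _ | a
        · -- a = 0 : k ∈ p, and k in some later list
          have hkp : k ∈ p := by simpa using hka
          have h1 : 0 < P.countP (fun q => decide (k ∈ q)) := by
            refine List.countP_pos_iff.mpr ?_
            have hb' : b < P.length := by
              simp only [List.length_cons] at hb; omega
            obtain ⟨q, hq, hkq⟩ := hmem.mpr ⟨b, hb', by simpa using hkb⟩
            exact ⟨q, hq, by simpa using hkq⟩
          rw [if_pos (show decide (k ∈ p) = true by simpa using hkp)]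
          omega
        · have h2 : 2 ≤ P.countP (fun q => decide (k ∈ q)) := by
            refine ih.mp ⟨a, b, by omega, ?_, by simpa using hka, by simpa using hkb⟩
            simp only [List.length_cons] at hb; omega
          split <;> omega
      · intro h2
        by_cases hkp : k ∈ p
        · have h1 : 0 < P.countP (fun q => decide (k ∈ q)) := by
            rw [if_pos (show decide (k ∈ p) = true by simpa using hkp)] at h2; omega
          obtain ⟨q, hq, hkq⟩ := List.countP_pos_iff.mp h1
          obtain ⟨b, hb, hkb⟩ := hmem.mp ⟨q, hq, by simpa using hkq⟩
          exact ⟨0, b + 1, by omega, by simp only [List.length_cons]; omega,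
            by simpa using hkp, by simpa using hkb⟩
        · have h2' : 2 ≤ P.countP (fun q => decide (k ∈ q)) := by
            rw [if_neg (show ¬ (decide (k ∈ p) = true) by simpa using hkp)] at h2
            omega
          obtain ⟨a, b, hab, hb, hka, hkb⟩ := ih.mpr h2'
          exact ⟨a + 1, b + 1, by omega, by simp only [List.length_cons]; omega,
            by simpa using hka, by simpa using hkb⟩

-- the pairwise double loop collects exactly the keys contained in ≥ 2 of the lists
lemma rp_mem_doubleLoop (k : String) (P : List (List String)) :
    (k ∈ (PySem.List.pyRange 0 ((P.length : Int) - 1) 1).foldl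
        (fun rs i =>
          (PySem.List.pyRange (i + 1) (P.length : Int) 1).foldl
            (fun rs j => PySem.Set.union rs (PySem.Set.inter
              (PySem.List.pyGetD P i []) (PySem.List.pyGetD P j []))) rs)
        PySem.Set.empty
      ↔ 2 ≤ P.countP (fun p => decide (k ∈ p))) := by
  have hinner : ∀ (i : Int) (s0 : PySem.Set String),
      (k ∈ (PySem.List.pyRange (i + 1) (P.length : Int) 1).foldl
          (fun rs j => PySem.Set.union rs (PySem.Set.inter
            (PySem.List.pyGetD P i []) (PySem.List.pyGetD P j []))) s0
        ↔ k ∈ s0 ∨ ∃ j ∈ PySem.List.pyRange (i + 1) (P.length : Int) 1,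
            k ∈ PySem.List.pyGetD P i [] ∧ k ∈ PySem.List.pyGetD P j []) := by
    intro i
    exact rp_mem_foldl_iff
      (fun j => k ∈ PySem.List.pyGetD P i [] ∧ k ∈ PySem.List.pyGetD P j []) _ k
      (fun s j => by rw [PySem.Set.mem_union, PySem.Set.mem_inter]) _
  have houter := rp_mem_foldl_iff
    (fun i => ∃ j ∈ PySem.List.pyRange (i + 1) (P.length : Int) 1,
        k ∈ PySem.List.pyGetD P i [] ∧ k ∈ PySem.List.pyGetD P j [])
    (fun rs i =>
      (PySem.List.pyRange (i + 1) (P.length : Int) 1).foldl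
        (fun rs j => PySem.Set.union rs (PySem.Set.inter
          (PySem.List.pyGetD P i []) (PySem.List.pyGetD P j []))) rs) k
    (fun s i => hinner i s)
    (PySem.List.pyRange 0 ((P.length : Int) - 1) 1) PySem.Set.empty
  rw [houter, ← rp_two_le_countP k P]
  constructor
  · rintro (h | ⟨i, hi, j, hj, hki, hkj⟩)
    · simp [PySem.Set.empty] at h
    · rw [PySem.List.mem_pyRange_one] at hi hj
      obtain ⟨a, rfl⟩ : ∃ a : Nat, i = (a : Int) := ⟨i.toNat, (Int.toNat_of_nonneg hi.1).symm⟩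
      obtain ⟨b, rfl⟩ : ∃ b : Nat, j = (b : Int) :=
        ⟨j.toNat, (Int.toNat_of_nonneg (by omega)).symm⟩
      refine ⟨a, b, by exact_mod_cast hj.1, by exact_mod_cast hj.2, ?_, ?_⟩
      · rw [← PySem.List.pyGetD_natCast]; exact hki
      · rw [← PySem.List.pyGetD_natCast]; exact hkj
  · rintro ⟨a, b, hab, hb, hka, hkb⟩
    refine Or.inr ⟨(a : Int), ?_, (b : Int), ?_, ?_, ?_⟩
    · rw [PySem.List.mem_pyRange_one]
      constructor
      · exact_mod_cast Nat.zero_le a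
      · have : a + 1 < P.length := by omega
        omega
    · rw [PySem.List.mem_pyRange_one]
      constructor
      · exact_mod_cast hab
      · exact_mod_cast hb
    · rw [PySem.List.pyGetD_natCast]; exact hka
    · rw [PySem.List.pyGetD_natCast]; exact hkb

def rp_keysOf (node : List (String × String)) : List String := (PySem.Dict.ofList node).keys

-- characterisation of B's counter
lemma rp_counts_getD (k : String) (node_list : List (List (String × String))) :
    (rpAlt_counts node_list).getD k 0 =
      (((node_list.map rp_keysOf).flatMap id).count k : Int) := by
  unfold rpAlt_counts
  suffices h : ∀ (l : List (List (String × String))) (d : PySem.Dict String Int),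
      (l.foldl (fun c node =>
          (PySem.Dict.ofList node).keys.foldl (fun c p => c.insert p (c.getD p 0 + 1)) c) d).getD k 0
        = d.getD k 0 + (((l.map rp_keysOf).flatMap id).count k : Int) by
    simpa [PySem.Dict.getD_empty] using h node_list PySem.Dict.empty
  intro l
  induction l with
  | nil => intro d; simp
  | cons node l ih =>
      intro d
      simp only [List.foldl_cons, List.map_cons, List.flatMap_cons, id, List.count_append]
      rw [ih, PySem.Dict.getD_foldl_insert_add_one]
      unfold rp_keysOf
      push_cast
      ring

-- the list built by construct_property_set's first loop is the list of key lists
lemma rp_propertyList_eq (node_list : List (List (String × String))) :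
    rp_propertyList node_list = node_list.map rp_keysOf := by
  unfold rp_propertyList
  rw [PySem.List.foldl_append_singleton_eq_map]
  simp only [List.nil_append]
  refine List.map_congr_left (fun node _ => ?_)
  exact PySem.Set.ofList_eq_self_of_nodup _ (PySem.Dict.nodup_keys_ofList node)

-- the two membership tests are the same boolean
lemma rp_cond_eq (node_list : List (List (String × String))) (k : String) :
    (rp_propertySet node_list).contains k = decide (2 ≤ (rpAlt_counts node_list).getD k 0) := by
  have hiff : k ∈ rp_propertySet node_list ↔ 2 ≤ (rpAlt_counts node_list).getD k 0 := by
    unfold rp_propertySet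
    rw [rp_propertyList_eq, rp_mem_doubleLoop, rp_counts_getD,
      rp_count_flatMap k _ ?_]
    · constructor <;> intro h <;> exact_mod_cast h
    · intro p hp
      rcases List.mem_map.mp hp with ⟨node, _, rfl⟩
      exact PySem.Dict.nodup_keys_ofList node
  rcases h1 : (rp_propertySet node_list).contains k <;>
    rcases h2 : decide (2 ≤ (rpAlt_counts node_list).getD k 0) <;>
      simp_all

-- per-node agreement
lemma rp_renameNode_eq (node_list : List (List (String × String))) (i : Int)
    (node : List (String × String)) :
    rp_renameNode (rp_propertySet node_list) i node
      = rpAlt_renameNode (rpAlt_counts node_list) i node := by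
  unfold rp_renameNode rpAlt_renameNode
  rw [List.foldl_filter]
  simp only [rp_cond_eq node_list]
  try rfl

-- ===== VERDICT (by name: the statement is the Claim_ definition above) =====
theorem rename_property_spec : Claim_equal_rename_property := by
  intro node_list _
  unfold Spec_rename_property rename_property rename_property_alt
  rw [rp_foldl_counter_eq_map]
  simp only [List.nil_append]
  exact List.map_congr_left (fun p _ => rp_renameNode_eq node_list p.1 p.2)
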